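-- pv_equiv track=rewrite | github.com/scailetech/opendraft | utils/add_page_breaks.py | add_page_breaks_to_sections
-- ===== SOURCE A (Python) =====
-- from typing import Tuple
--
-- def add_page_breaks_to_sections(content: str) -> Tuple[str, int]:
--     """
--     Add \\newpage before top-level headings (# Title).
--
--     Args:
--         content: Markdown content
--
--     Returns:
--         Tuple of (modified_content, page_breaks_added)
--     """
--     lines = content.split('\n')
--     result = []
--     page_breaks_added = 0
--
--     for i, line in enumerate(lines):
--         # Check if this is a top-level heading (# Heading)
--         if line.strip().startswith('# ') and not line.strip().startswith('##'):
--             # Don't add page break if: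
--             # 1. This is the first line
--             # 2. Previous line already has \\newpage
--             # 3. Previous non-empty line has \\newpage
--             if i > 0:
--                 # Check last few lines for existing \\newpage
--                 has_newpage = False
--                 for j in range(max(0, i-3), i):
--                     if '\\newpage' in lines[j]:
--                         has_newpage = True
--                         break
--
--                 if not has_newpage:
--                     result.append('\\newpage')
--                     result.append('')  # Empty line for readability
--                     page_breaks_added += 1
--
--         result.append(line)
--
--     return '\n'.join(result), page_breaks_added
-- ===== SOURCE B (Python) =====
-- from typing import Tuple
--
-- def add_page_breaks_to_sections(content: str) -> Tuple[str, int]: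
--     """Staged prefix-sum approach: precompute a prefix count of '\\newpage'
--     lines, decide each insertion by comparing two prefix values, and build
--     the result as one piece per original line."""
--     lines = content.split('\n')
--
--     pref = [0]
--     for line in lines:
--         pref.append(pref[-1] + (1 if '\\newpage' in line else 0))
--
--     def needs(i: int, line: str) -> bool:
--         s = line.strip()
--         return (i > 0 and s.startswith('# ') and not s.startswith('##')
--                 and pref[i] == pref[max(0, i - 3)])
--
--     pieces = ['\\newpage\n\n' + line if needs(i, line) else line
--               for i, line in enumerate(lines)]
--     count = sum(1 for i, line in enumerate(lines) if needs(i, line))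
--     return '\n'.join(pieces), count
-- ===== Notes on version B (the rewrite author's own statement) =====
-- stated objective: alternative
-- what changed: Replaces A's bounded backward rescan inside an accumulator loop by a staged design: a prefix-count array of '\newpage' lines decides each insertion by comparing two prefix values, and the output is built as one piece per original line instead of appending break lines into a running result list.
import Mathlib
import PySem

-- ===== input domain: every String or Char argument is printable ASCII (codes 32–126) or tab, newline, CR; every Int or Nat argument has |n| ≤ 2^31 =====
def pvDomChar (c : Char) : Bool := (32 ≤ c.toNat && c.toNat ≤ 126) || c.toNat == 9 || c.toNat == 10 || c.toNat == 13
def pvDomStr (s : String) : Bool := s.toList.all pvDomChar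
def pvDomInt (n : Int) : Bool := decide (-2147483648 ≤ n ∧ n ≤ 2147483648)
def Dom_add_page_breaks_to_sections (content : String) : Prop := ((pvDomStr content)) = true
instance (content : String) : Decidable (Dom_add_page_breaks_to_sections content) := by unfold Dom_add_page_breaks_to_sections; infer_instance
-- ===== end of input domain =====

-- B replaces A's per-heading 3-line backward rescan inside an accumulator loop by a
-- staged design: a prefix count of '\newpage' lines decides each insertion, and the
-- output is built as one piece per original line (objective: alternative).

-- ===== PORT A =====

-- line.strip().startswith('# ') and not line.strip().startswith('##')
def pvIsHeading (line : String) : Bool :=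
  PySem.Str.startswith (PySem.Str.strip line) "# " &&
    !(PySem.Str.startswith (PySem.Str.strip line) "##")

-- the inner 'for j in range(max(0, i-3), i): if "\newpage" in lines[j]: has=True; break'
def pvWindowLoop (lines : List String) (j i : Nat) : Bool :=
  if j < i then
    (if PySem.Str.isIn "\\newpage" (lines.getD j "") then true
     else pvWindowLoop lines (j + 1) i)
  else false
termination_by i - j

-- the main 'for i, line in enumerate(lines)' loop with its result accumulator
def pvAGo (lines : List String) (i : Nat) (todo : List String)
    (res : List String) (cnt : Int) : String × Int :=
  match todo with
  | [] => (PySem.Str.join "\n" res, cnt)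
  | line :: rest =>
    if pvIsHeading line && decide (0 < i) then
      if pvWindowLoop lines (i - 3) i then
        pvAGo lines (i + 1) rest (res ++ [line]) cnt
      else
        pvAGo lines (i + 1) rest (res ++ ["\\newpage", "", line]) (cnt + 1)
    else
      pvAGo lines (i + 1) rest (res ++ [line]) cnt

def add_page_breaks_to_sections (content : String) : String × Int :=
  -- split? with sep "\n" ≠ "" always returns some
  let lines := (PySem.Str.split? content "\n").getD []
  pvAGo lines 0 lines [] 0

-- ===== PORT B =====

-- pref = [0]; for line in lines: pref.append(pref[-1] + (1 if '\newpage' in line else 0))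
def pvPref (lines : List String) : List Nat :=
  lines.foldl
    (fun acc line =>
      acc ++ [acc.getLastD 0 + (if PySem.Str.isIn "\\newpage" line then 1 else 0)])
    [0]

-- def needs(i, line); i comes from enumerate so 0 ≤ i, and pref[max(0, i-3)] = pref[(i-3).toNat]
def pvNeeds (pref : List Nat) (i : Int) (line : String) : Bool :=
  let s := PySem.Str.strip line
  decide (0 < i) && PySem.Str.startswith s "# " && !PySem.Str.startswith s "##" &&
    (pref.getD i.toNat 0 == pref.getD (i - 3).toNat 0)

def add_page_breaks_to_sections_alt (content : String) : String × Int :=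
  let lines := (PySem.Str.split? content "\n").getD []
  let pref := pvPref lines
  let pieces := (PySem.List.enumerate lines).map
    (fun p => if pvNeeds pref p.1 p.2 then "\\newpage\n\n" ++ p.2 else p.2)
  let count := ((PySem.List.enumerate lines).countP (fun p => pvNeeds pref p.1 p.2) : Int)
  (PySem.Str.join "\n" pieces, count)

-- ===== PRECONDITION & SPEC =====
def Spec_add_page_breaks_to_sections (content : String) (out : String × Int) : Prop := out = add_page_breaks_to_sections_alt content
instance (content : String) (out : String × Int) : Decidable (Spec_add_page_breaks_to_sections content out) := by unfold Spec_add_page_breaks_to_sections; infer_instance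

-- ===== CLAIM (what is proved, stated in full; the proofs are below) =====
def Claim_equal_add_page_breaks_to_sections : Prop := ∀ (content : String), Dom_add_page_breaks_to_sections content → Spec_add_page_breaks_to_sections content (add_page_breaks_to_sections content)

-- ===== LEMMAS AND PROOFS =====

def pvNP (lines : List String) (t : Nat) : Bool := PySem.Str.isIn "\\newpage" (lines.getD t "")

def pvNPf (l : String) : Bool := PySem.Str.isIn "\\newpage" l

-- count of '\newpage' lines among lines[0..k)
def pvCntTo (lines : List String) (k : Nat) : Nat := (lines.take k).countP pvNPf

-- the tail that pvPref's foldl appends after the initial [0]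
def pvTailF (m : Nat) : List String → List Nat
  | [] => []
  | l :: r => (m + (if PySem.Str.isIn "\\newpage" l then 1 else 0))
                :: pvTailF (m + (if PySem.Str.isIn "\\newpage" l then 1 else 0)) r

lemma pvPref_foldl (ls : List String) :
    ∀ acc : List Nat,
      ls.foldl
        (fun acc line =>
          acc ++ [acc.getLastD 0 + (if PySem.Str.isIn "\\newpage" line then 1 else 0)]) acc
        = acc ++ pvTailF (acc.getLastD 0) ls := by
  induction ls with
  | nil => intro acc; simp [pvTailF]
  | cons l r ih =>
    intro acc
    simp only [List.foldl_cons, pvTailF]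
    rw [ih]
    simp

lemma pvTailF_getD (ls : List String) :
    ∀ m i, i < ls.length →
      (pvTailF m ls).getD i 0 = m + pvCntTo ls (i + 1) := by
  induction ls with
  | nil => intro m i h; simp at h
  | cons l r ih =>
    intro m i h
    cases i with
    | zero => simp [pvTailF, pvCntTo, pvNPf, List.countP_cons]
    | succ j =>
      simp only [pvTailF, List.getD_cons_succ]
      rw [ih _ j (by simpa using h)]
      simp [pvCntTo, pvNPf, List.countP_cons]
      split_ifs <;> omega

lemma pvPref_getD (lines : List String) (i : Nat) (h : i ≤ lines.length) :
    (pvPref lines).getD i 0 = pvCntTo lines i := by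
  unfold pvPref
  rw [pvPref_foldl]
  cases i with
  | zero => simp [pvCntTo]
  | succ j =>
    have h1 : ([0] ++ pvTailF (([0] : List Nat).getLastD 0) lines).getD (j + 1) 0
        = (pvTailF 0 lines).getD j 0 := by simp
    rw [h1, pvTailF_getD lines 0 j (by omega)]
    omega

lemma pvWindowLoop_true_iff (lines : List String) (j i : Nat) :
    pvWindowLoop lines j i = true ↔ ∃ t, j ≤ t ∧ t < i ∧ pvNP lines t = true := by
  by_cases h : j < i
  · rw [pvWindowLoop]
    simp only [if_pos h]
    by_cases hnp : PySem.Str.isIn "\\newpage" (lines.getD j "") = true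
    · simp only [if_pos hnp]
      constructor
      · intro _; exact ⟨j, le_refl _, h, hnp⟩
      · intro _; trivial
    · simp only [if_neg hnp]
      rw [pvWindowLoop_true_iff lines (j+1) i]
      constructor
      · rintro ⟨t, h1, h2, h3⟩; exact ⟨t, by omega, h2, h3⟩
      · rintro ⟨t, h1, h2, h3⟩
        refine ⟨t, ?_, h2, h3⟩
        rcases Nat.eq_or_lt_of_le h1 with h' | h'
        · subst h'; exact absurd h3 (by simpa [pvNP] using hnp)
        · omega
  · rw [pvWindowLoop]
    simp only [if_neg h]
    constructor
    · intro hc; exact absurd hc (by simp)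
    · rintro ⟨t, h1, h2, _⟩; omega
termination_by i - j

-- a '\newpage' somewhere in the window [i-3, i) is exactly a prefix-count difference
lemma pvWindow_eq_pref (lines : List String) (i : Nat) (hi : i < lines.length) :
    pvWindowLoop lines (i - 3) i
      = !((pvPref lines).getD i 0 == (pvPref lines).getD (i - 3) 0) := by
  rw [pvPref_getD lines i (by omega), pvPref_getD lines (i - 3) (by omega)]
  have hsplit : pvCntTo lines i
      = pvCntTo lines (i - 3) + ((lines.drop (i - 3)).take (i - (i - 3))).countP pvNPf := by
    unfold pvCntTo
    rw [show i = (i - 3) + (i - (i - 3)) by omega, List.take_add]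
    simp [List.countP_append]
  have hlen : ((lines.drop (i - 3)).take (i - (i - 3))).length = i - (i - 3) := by
    simp
    omega
  have hex : pvWindowLoop lines (i - 3) i = true
      ↔ 0 < ((lines.drop (i - 3)).take (i - (i - 3))).countP pvNPf := by
    rw [pvWindowLoop_true_iff, List.countP_pos_iff]
    constructor
    · rintro ⟨t, h1, h2, h3⟩
      refine ⟨((lines.drop (i - 3)).take (i - (i - 3)))[t - (i - 3)]'(by omega), List.getElem_mem _, ?_⟩
      have hg : ((lines.drop (i - 3)).take (i - (i - 3)))[t - (i - 3)]'(by omega)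
          = lines[(i - 3) + (t - (i - 3))]'(by omega) := by
        simp [List.getElem_take, List.getElem_drop]
      rw [hg]
      have : lines.getD t "" = lines[(i - 3) + (t - (i - 3))]'(by omega) := by
        rw [List.getD_eq_getElem lines "" (by omega : t < lines.length)]
        congr 1
        omega
      rw [← this]
      exact h3
    · rintro ⟨x, hx, hpx⟩
      obtain ⟨k, hk, hget⟩ := List.getElem_of_mem hx
      rw [hlen] at hk
      refine ⟨(i - 3) + k, by omega, by omega, ?_⟩
      have hg : x = lines[(i - 3) + k]'(by omega) := by
        rw [← hget]
        simp [List.getElem_take, List.getElem_drop]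
      rw [pvNP, List.getD_eq_getElem lines "" (by omega : (i - 3) + k < lines.length), ← hg]
      exact hpx
  cases hW : pvWindowLoop lines (i - 3) i with
  | false =>
    have : ((lines.drop (i - 3)).take (i - (i - 3))).countP pvNPf = 0 := by
      by_contra h
      exact absurd (hex.mpr (by omega)) (by simp [hW])
    simp
    omega
  | true =>
    have := hex.mp hW
    simp
    omega

-- A's per-line break condition
def pvBrkA (lines : List String) (i : Nat) (line : String) : Bool :=
  pvIsHeading line && decide (0 < i) && !pvWindowLoop lines (i - 3) i

-- the lines A's loop emits from position i on
def pvFA (lines : List String) (i : Nat) : List String → List String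
  | [] => []
  | l :: r =>
    if pvBrkA lines i l then "\\newpage" :: "" :: l :: pvFA lines (i + 1) r
    else l :: pvFA lines (i + 1) r

-- the breaks A's loop counts from position i on
def pvCA (lines : List String) (i : Nat) : List String → Int
  | [] => 0
  | l :: r => (if pvBrkA lines i l then 1 else 0) + pvCA lines (i + 1) r
lemma pvAGo_eq (lines : List String) :
    ∀ (todo : List String) (i : Nat) (res : List String) (cnt : Int),
      pvAGo lines i todo res cnt
        = (PySem.Str.join "\n" (res ++ pvFA lines i todo), cnt + pvCA lines i todo) := by
  intro todo
  induction todo with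
  | nil => intro i res cnt; simp [pvAGo, pvFA, pvCA]
  | cons l r ih =>
    intro i res cnt
    simp only [pvAGo, pvFA, pvCA, pvBrkA]
    rcases Bool.eq_false_or_eq_true (pvIsHeading l && decide (0 < i)) with hH | hH <;>
      rcases Bool.eq_false_or_eq_true (pvWindowLoop lines (i - 3) i) with hW | hW <;>
        simp [hH, hW, ih, List.append_assoc]
    all_goals omega
lemma pvCond_eq (lines : List String) (i : Nat) (hi : i < lines.length) (l : String) :
    pvBrkA lines i l = pvNeeds (pvPref lines) (i : Int) l := by
  unfold pvBrkA pvNeeds pvIsHeading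
  rw [pvWindow_eq_pref lines i hi]
  have h1 : ((i : Int)).toNat = i := by omega
  have h2 : ((i : Int) - 3).toNat = i - 3 := by omega
  have h3 : decide (0 < (i : Int)) = decide (0 < i) := by
    rw [decide_eq_decide]; exact Int.natCast_pos
  rw [h1, h2, h3]
  rcases Bool.eq_false_or_eq_true (PySem.Str.startswith (PySem.Str.strip l) "# ") with ha | ha <;>
  rcases Bool.eq_false_or_eq_true (PySem.Str.startswith (PySem.Str.strip l) "##") with hb | hb <;>
  rcases Bool.eq_false_or_eq_true (decide (0 < i)) with hc | hc <;>
  rcases Bool.eq_false_or_eq_true ((pvPref lines).getD i 0 == (pvPref lines).getD (i - 3) 0) with hd | hd <;>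
  simp_all
lemma pvFA_cons_ex (lines : List String) (i : Nat) (l : String) (r : List String) :
    ∃ z zs, pvFA lines i (l :: r) = z :: zs := by
  unfold pvFA
  cases pvBrkA lines i l <;> simp

lemma pvJoin_eq (lines : List String) :
    ∀ (todo : List String) (i : Nat), i + todo.length ≤ lines.length →
      PySem.Str.join "\n" (pvFA lines i todo)
        = PySem.Str.join "\n" ((PySem.List.enumerate todo (i : Int)).map
            (fun p => if pvNeeds (pvPref lines) p.1 p.2 then "\\newpage\n\n" ++ p.2 else p.2)) := by
  intro todo
  induction todo with
  | nil => intro i _; rfl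
  | cons l r ih =>
    intro i hlen
    have hi : i < lines.length := by simp at hlen; omega
    apply String.toList_inj.mp
    rw [PySem.List.enumerate_cons]
    simp only [List.map_cons, PySem.Str.toList_join]
    have hcast : (i : Int) + 1 = ((i + 1 : Nat) : Int) := by push_cast; ring
    have hIH := congrArg String.toList (ih (i + 1) (by simp at hlen ⊢; omega))
    simp only [PySem.Str.toList_join] at hIH
    rw [hcast]
    unfold pvFA
    rw [← pvCond_eq lines i hi]
    have hlit : ("\\newpage\n\n").toList
        = "\\newpage".toList ++ "\n".toList ++ "\n".toList := by decide
    cases r with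
    | nil =>
      have hnil : pvFA lines (i + 1) [] = [] := rfl
      rcases Bool.eq_false_or_eq_true (pvBrkA lines i l) with hb | hb <;>
        simp [hb, hnil, PySem.Chars.join_cons_cons, PySem.Chars.join_singleton,
          String.toList_append, hlit, List.append_assoc]
    | cons y t =>
      obtain ⟨z, zs, hz⟩ := pvFA_cons_ex lines (i + 1) y t
      rw [hz] at hIH ⊢
      rw [PySem.List.enumerate_cons] at hIH ⊢
      simp only [List.map_cons] at hIH ⊢
      rcases Bool.eq_false_or_eq_true (pvBrkA lines i l) with hb | hb <;>
        simp only [hb, if_true, if_false, Bool.false_eq_true, List.map_cons,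
          PySem.Chars.join_cons_cons] <;>
        rw [← hIH]  <;>
        simp [String.toList_append, hlit, List.append_assoc, PySem.Chars.join_cons_cons]
lemma pvCnt_eq (lines : List String) :
    ∀ (todo : List String) (i : Nat), i + todo.length ≤ lines.length →
      pvCA lines i todo
        = ((PySem.List.enumerate todo (i : Int)).countP
            (fun p => pvNeeds (pvPref lines) p.1 p.2) : Int) := by
  intro todo
  induction todo with
  | nil => intro i _; rfl
  | cons l r ih =>
    intro i hlen
    have hi : i < lines.length := by simp at hlen; omega
    have hcast : (i : Int) + 1 = ((i + 1 : Nat) : Int) := by push_cast; ring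
    unfold pvCA
    rw [PySem.List.enumerate_cons, List.countP_cons,
      ih (i + 1) (by simp at hlen ⊢; omega), hcast]
    have hc : (fun p => pvNeeds (pvPref lines) (Prod.fst p) (Prod.snd p)) ((i : Int), l)
        = pvBrkA lines i l := by
      simp only [← pvCond_eq lines i hi]
    simp only [hc]
    rcases Bool.eq_false_or_eq_true (pvBrkA lines i l) with hb | hb <;> simp [hb] <;> omega

-- ===== VERDICT (by name: the statement is the Claim_ definition above) =====
theorem add_page_breaks_to_sections_spec : Claim_equal_add_page_breaks_to_sections := by
  intro content _
  unfold Spec_add_page_breaks_to_sections add_page_breaks_to_sections add_page_breaks_to_sections_alt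
  rw [pvAGo_eq]
  refine Prod.ext ?_ ?_
  · simpa using pvJoin_eq ((PySem.Str.split? content "\n").getD []) _ 0 (by simp)
  · simpa using pvCnt_eq ((PySem.Str.split? content "\n").getD []) _ 0 (by simp)
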